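-- pv_equiv track=rewrite | github.com/tt67wq/euler_project | leetcode/xor-game/solve.py | xor_test
-- ===== SOURCE A (Python) =====
-- import copy
--
-- def xor_test(nums, index):
--     nums = list(filter(lambda x: x >= 0, nums))
--     s = 0
--     for x in nums:
--         s ^= x
--
--     if s == 0:
--         return True
--
--     win = False
--     for i in range(len(nums)):
--         origin = nums[i]
--         nums[i] = -1
--         if xor_test(copy.deepcopy(nums), index+1):
--             nums[i] = origin
--         else:
--             win = True
--             break
--     return win
-- ===== SOURCE B (Python) =====
-- def xor_test(nums, index):
--     s = 0
--     n = 0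
--     for x in nums:
--         if x >= 0:
--             s ^= x
--             n += 1
--     return s == 0 or n % 2 == 0
-- ===== Notes on version B (the rewrite author's own statement) =====
-- stated objective: faster
-- what changed: Replaced the exhaustive recursive game search (trying every erasure at every level) by the closed-form game-theory result: first player wins iff the xor of the nonnegative elements is 0 or their count is even, computed in one pass.
import Mathlib
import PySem

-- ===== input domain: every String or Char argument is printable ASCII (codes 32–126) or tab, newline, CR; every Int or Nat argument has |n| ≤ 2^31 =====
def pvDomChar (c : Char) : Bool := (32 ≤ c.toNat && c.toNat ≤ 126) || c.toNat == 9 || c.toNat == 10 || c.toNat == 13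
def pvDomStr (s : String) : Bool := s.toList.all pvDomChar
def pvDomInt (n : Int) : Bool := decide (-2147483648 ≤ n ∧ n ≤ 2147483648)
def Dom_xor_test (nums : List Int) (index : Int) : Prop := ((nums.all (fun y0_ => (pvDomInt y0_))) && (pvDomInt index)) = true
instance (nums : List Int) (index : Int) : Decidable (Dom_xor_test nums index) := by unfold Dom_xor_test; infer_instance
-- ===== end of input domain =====

-- B replaces A's exhaustive recursive game search by the closed-form criterion
-- (xor of the nonnegative elements is 0, or their count is even), computed in one pass.


-- ===== PORT A =====
-- two lemmas cited by the port's decreasing_by (termination: each recursive call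
-- erases one nonnegative element, so the filtered length strictly drops)
theorem pv_filter_set_neg (xs : List Int) (i : Nat)
    (h : ∀ x ∈ xs, 0 ≤ x) (hi : i < xs.length) :
    (xs.set i (-1)).filter (fun x => decide (0 ≤ x)) = xs.eraseIdx i := by
  induction xs generalizing i with
  | nil => simp at hi
  | cons a t ih =>
    cases i with
    | zero =>
      simp only [List.set, List.eraseIdx, List.filter]
      rw [List.filter_eq_self.2 (by intro x hx; exact decide_eq_true (h x (List.mem_cons_of_mem a hx)))]
      norm_num
    | succ j =>
      have ha : 0 ≤ a := h a List.mem_cons_self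
      simp only [List.set, List.eraseIdx, List.filter, decide_eq_true ha]
      rw [ih j (fun x hx => h x (List.mem_cons_of_mem a hx)) (by simpa using hi)]

theorem pv_unattach_filter (l : List Int) (ys : List {x // x ∈ l}) :
    (ys.filter (fun x => decide (0 ≤ x.1))).unattach
      = ys.unattach.filter (fun x => decide (0 ≤ x)) := by
  induction ys with
  | nil => rfl
  | cons a t ih =>
    cases a with
    | mk v hv =>
      by_cases hvn : 0 ≤ v <;>
        simp [hvn, ih, List.unattach_cons]

-- literal port of A: filter the nonnegatives, xor them; win if the xor is 0 or some
-- erasure (the break/restore loop = the short-circuit `any`) leaves the opponent losing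
def xor_test (nums : List Int) (index : Int) : Bool :=
  let nums2 := nums.filter (fun x => decide (0 ≤ x))
  let s := nums2.foldl (fun s x => PySem.Int.bxor s x) 0
  if s = 0 then true
  else
    (List.range nums2.length).attach.any (fun i =>
      ! xor_test (nums2.set i.1 (-1)) (index + 1))
termination_by (nums.filter (fun x => decide (0 ≤ x))).length
decreasing_by
  have heq : (nums.attach.filter (fun (x : {x // x ∈ nums}) => decide (0 ≤ x.1))).unattach
      = nums.filter (fun x => decide (0 ≤ x)) := by
    rw [pv_unattach_filter, List.unattach_attach]
  have hall : ∀ x ∈ nums.filter (fun x => decide (0 ≤ x)), 0 ≤ x := by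
    intro x hx; have := List.of_mem_filter hx; simpa using this
  have hi : i.1 < ((nums.attach.filter (fun (x : {x // x ∈ nums}) => decide (0 ≤ x.1))).unattach).length :=
    List.mem_range.1 i.2
  rw [heq] at hi
  show (List.filter (fun x => decide (0 ≤ x))
      (((nums.attach.filter (fun (x : {x // x ∈ nums}) => decide (0 ≤ x.1))).unattach).set i.1 (-1))).length
    < (List.filter (fun x => decide (0 ≤ x)) nums).length
  rw [heq, pv_filter_set_neg _ _ hall hi]
  have := List.length_eraseIdx_of_lt hi
  omega

-- ===== PORT B =====
-- literal port of B: one pass accumulating (xor, count) over the nonnegative elements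
def xor_test_alt (nums : List Int) (index : Int) : Bool :=
  let sn := nums.foldl
    (fun (p : Int × Int) x => if 0 ≤ x then (PySem.Int.bxor p.1 x, p.2 + 1) else p) (0, 0)
  decide (sn.1 = 0) || decide (PySem.Int.mod sn.2 2 = 0)

-- ===== PRECONDITION & SPEC =====
def Spec_xor_test (nums : List Int) (index : Int) (out : Bool) : Prop := out = xor_test_alt nums index
instance (nums : List Int) (index : Int) (out : Bool) : Decidable (Spec_xor_test nums index out) := by unfold Spec_xor_test; infer_instance

-- ===== CLAIM (what is proved, stated in full; the proofs are below) =====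
def Claim_equal_xor_test : Prop := ∀ (nums : List Int) (index : Int), Dom_xor_test nums index → Spec_xor_test nums index (xor_test nums index)

-- ===== LEMMAS AND PROOFS =====

-- xor of a list, as A computes it
def pvX (xs : List Int) : Int := xs.foldl (fun s x => PySem.Int.bxor s x) 0

-- the closed form B computes, over the filtered list
def pvClosed (nums : List Int) : Bool :=
  let xs := nums.filter (fun x => decide (0 ≤ x))
  decide (pvX xs = 0) || decide (xs.length % 2 = 0)

theorem pv_bxor_nonneg {a b : Int} (ha : 0 ≤ a) (hb : 0 ≤ b) : 0 ≤ PySem.Int.bxor a b := by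
  rw [PySem.Int.bxor_of_nonneg ha hb]; exact Int.natCast_nonneg _

theorem pv_bxor_assoc {a b c : Int} (ha : 0 ≤ a) (hb : 0 ≤ b) (hc : 0 ≤ c) :
    PySem.Int.bxor (PySem.Int.bxor a b) c = PySem.Int.bxor a (PySem.Int.bxor b c) := by
  rw [PySem.Int.bxor_of_nonneg ha hb, PySem.Int.bxor_of_nonneg hb hc,
      PySem.Int.bxor_of_nonneg (by positivity) hc, PySem.Int.bxor_of_nonneg ha (by positivity)]
  simp [Nat.xor_assoc]

theorem pv_bxor_zero_left (a : Int) : PySem.Int.bxor 0 a = a := by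
  rw [PySem.Int.bxor_comm]; simp

theorem pv_bxor_eq_zero {a b : Int} (ha : 0 ≤ a) (hb : 0 ≤ b)
    (h : PySem.Int.bxor a b = 0) : a = b := by
  rw [PySem.Int.bxor_of_nonneg ha hb] at h
  have h1 : a.toNat ^^^ b.toNat = 0 := by exact_mod_cast h
  have h2 := Nat.xor_eq_zero_iff.1 h1
  omega

theorem pvX_nonneg (xs : List Int) (h : ∀ x ∈ xs, 0 ≤ x) : 0 ≤ pvX xs := by
  suffices H : ∀ (s : Int), 0 ≤ s → 0 ≤ xs.foldl (fun s x => PySem.Int.bxor s x) s from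
    H 0 le_rfl
  induction xs with
  | nil => intro s hs; exact hs
  | cons a t ih =>
    intro s hs
    simp only [List.foldl_cons]
    exact ih (fun x hx => h x (List.mem_cons_of_mem a hx))
      _ (pv_bxor_nonneg hs (h a List.mem_cons_self))

theorem pvX_foldl (xs : List Int) (s : Int) (hs : 0 ≤ s) (h : ∀ x ∈ xs, 0 ≤ x) :
    xs.foldl (fun s x => PySem.Int.bxor s x) s = PySem.Int.bxor s (pvX xs) := by
  induction xs generalizing s with
  | nil => simp [pvX]
  | cons a t ih =>
    have ha : 0 ≤ a := h a List.mem_cons_self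
    have ht : ∀ x ∈ t, 0 ≤ x := fun x hx => h x (List.mem_cons_of_mem a hx)
    have hXt : 0 ≤ pvX t := pvX_nonneg t ht
    have hcons : pvX (a :: t) = t.foldl (fun s x => PySem.Int.bxor s x) a := by
      show (a :: t).foldl (fun s x => PySem.Int.bxor s x) 0 = _
      rw [List.foldl_cons, pv_bxor_zero_left]
    simp only [List.foldl_cons]
    rw [ih _ (pv_bxor_nonneg hs ha) ht, hcons, ih _ ha ht, pv_bxor_assoc hs ha hXt]

theorem pvX_cons (a : Int) (t : List Int) (ha : 0 ≤ a) (ht : ∀ x ∈ t, 0 ≤ x) :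
    pvX (a :: t) = PySem.Int.bxor a (pvX t) := by
  show (a :: t).foldl (fun s x => PySem.Int.bxor s x) 0 = _
  rw [List.foldl_cons, pv_bxor_zero_left, pvX_foldl t a ha ht]

theorem pvX_eraseIdx (xs : List Int) (i : Nat) (h : ∀ x ∈ xs, 0 ≤ x) (hi : i < xs.length) :
    pvX (xs.eraseIdx i) = PySem.Int.bxor (pvX xs) xs[i] := by
  induction xs generalizing i with
  | nil => simp at hi
  | cons a t ih =>
    have ha : 0 ≤ a := h a List.mem_cons_self
    have ht : ∀ x ∈ t, 0 ≤ x := fun x hx => h x (List.mem_cons_of_mem a hx)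
    have hXt : 0 ≤ pvX t := pvX_nonneg t ht
    cases i with
    | zero =>
      simp only [List.eraseIdx, List.getElem_cons_zero]
      rw [pvX_cons a t ha ht]
      symm
      rw [PySem.Int.bxor_comm (PySem.Int.bxor a (pvX t)) a, ← pv_bxor_assoc ha ha hXt,
          PySem.Int.bxor_self, pv_bxor_zero_left]
    | succ j =>
      have hj : j < t.length := by simpa using hi
      have hgej : 0 ≤ t[j] := ht _ (List.getElem_mem hj)
      have herase : ∀ x ∈ t.eraseIdx j, 0 ≤ x := fun x hx => ht x (List.mem_of_mem_eraseIdx hx)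
      simp only [List.eraseIdx, List.getElem_cons_succ]
      rw [pvX_cons a _ ha herase, pvX_cons a t ha ht, ih j ht hj,
          ← pv_bxor_assoc ha (pvX_nonneg t ht) hgej]

theorem pvX_replicate (n : Nat) (s : Int) (hs : 0 ≤ s) :
    pvX (List.replicate n s) = if n % 2 = 0 then 0 else s := by
  induction n with
  | zero => simp [pvX]
  | succ m ih =>
    rw [List.replicate_succ,
        pvX_cons s _ hs (by intro x hx; rw [List.eq_of_mem_replicate hx]; exact hs), ih]
    rcases Nat.even_or_odd m with hm | hm
    · have h1 : m % 2 = 0 := Nat.even_iff.1 hm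
      have h2 : (m + 1) % 2 = 1 := by omega
      simp [h1, h2]
    · have h1 : m % 2 = 1 := Nat.odd_iff.1 hm
      have h2 : (m + 1) % 2 = 0 := by omega
      simp [h1, h2]

-- B's fold computes the xor and the count of the filtered list
theorem pv_alt_fold (xs : List Int) (s n : Int) (hs : 0 ≤ s) :
    xs.foldl (fun (p : Int × Int) x => if 0 ≤ x then (PySem.Int.bxor p.1 x, p.2 + 1) else p) (s, n)
      = ((xs.filter (fun x => decide (0 ≤ x))).foldl (fun s x => PySem.Int.bxor s x) s,
         n + ((xs.filter (fun x => decide (0 ≤ x))).length : Int)) := by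
  induction xs generalizing s n with
  | nil => simp
  | cons a t ih =>
    by_cases ha : 0 ≤ a
    · have hf : (a :: t).filter (fun x => decide (0 ≤ x)) = a :: t.filter (fun x => decide (0 ≤ x)) := by
        simp [ha]
      simp only [List.foldl_cons, if_pos ha]
      rw [ih _ _ (pv_bxor_nonneg hs ha), hf]
      simp only [List.foldl_cons, List.length_cons, Prod.mk.injEq]
      exact ⟨trivial, by push_cast; ring⟩
    · have hf : (a :: t).filter (fun x => decide (0 ≤ x)) = t.filter (fun x => decide (0 ≤ x)) := by
        simp [ha]
      simp only [List.foldl_cons, if_neg ha, hf]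
      exact ih _ _ hs

theorem pv_alt_eq_closed (nums : List Int) (index : Int) :
    xor_test_alt nums index = pvClosed nums := by
  unfold xor_test_alt pvClosed
  rw [pv_alt_fold nums 0 0 le_rfl]
  simp only [zero_add]
  have hmod : decide (PySem.Int.mod (((nums.filter (fun x => decide (0 ≤ x))).length : Nat) : Int) 2 = 0)
      = decide ((nums.filter (fun x => decide (0 ≤ x))).length % 2 = 0) := by
    have h2 : ((2 : Int)) = ((2 : Nat) : Int) := by norm_num
    rw [h2, PySem.Int.mod_natCast]
    simp only [Int.natCast_eq_zero]
  rw [hmod]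
  rfl

theorem pv_filter_members (nums : List Int) :
    ∀ x ∈ nums.filter (fun x => decide (0 ≤ x)), 0 ≤ x := by
  intro x hx; have := List.of_mem_filter hx; simpa using this

-- main game-theory lemma: A's exhaustive search equals the closed form
theorem pv_main : ∀ (m : Nat) (nums : List Int) (index : Int),
    (nums.filter (fun x => decide (0 ≤ x))).length ≤ m →
    xor_test nums index = pvClosed nums := by
  intro m
  induction m with
  | zero =>
    intro nums index hlen
    have hnil : nums.filter (fun x => decide (0 ≤ x)) = [] := by
      cases hf : nums.filter (fun x => decide (0 ≤ x)) with
      | nil => rfl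
      | cons a t => rw [hf] at hlen; simp at hlen
    rw [xor_test]
    simp only [hnil]
    rw [pvClosed]
    simp [hnil, pvX]
  | succ k ih =>
    intro nums index hlen
    have hall : ∀ x ∈ nums.filter (fun x => decide (0 ≤ x)), 0 ≤ x := pv_filter_members nums
    rw [xor_test]
    set xs := nums.filter (fun x => decide (0 ≤ x)) with hxs
    have hXfold : xs.foldl (fun s x => PySem.Int.bxor s x) 0 = pvX xs := rfl
    by_cases hs : pvX xs = 0
    · rw [if_pos (by rw [hXfold]; exact hs), pvClosed]
      simp only [← hxs]
      simp [hs]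
    · rw [if_neg (by rw [hXfold]; exact hs)]
      have hlen0 : xs.length ≠ 0 := by
        intro h0
        have hxsnil : xs = [] := List.length_eq_zero_iff.1 h0
        exact hs (by rw [hxsnil]; rfl)
      -- value of each child: erase position i, closed form again (by ih)
      have hchild : ∀ i : Nat, i < xs.length →
          xor_test (xs.set i (-1)) (index + 1)
            = (decide (pvX (xs.eraseIdx i) = 0) || decide ((xs.length - 1) % 2 = 0)) := by
        intro i hi
        have hf : (xs.set i (-1)).filter (fun x => decide (0 ≤ x)) = xs.eraseIdx i :=
          pv_filter_set_neg xs i hall hi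
        have hlen' : ((xs.set i (-1)).filter (fun x => decide (0 ≤ x))).length ≤ k := by
          rw [hf, List.length_eraseIdx_of_lt hi]; omega
        rw [ih _ (index + 1) hlen', pvClosed]
        simp only [hf]
        rw [List.length_eraseIdx_of_lt hi]
      rcases Nat.even_or_odd xs.length with hev | hod
      · -- even length, xor ≠ 0 : some element differs from the total xor, A finds a win
        have hevm : xs.length % 2 = 0 := Nat.even_iff.1 hev
        have hodd1 : (xs.length - 1) % 2 = 1 := by omega
        have hex : ∃ i : Nat, ∃ hi : i < xs.length, xs[i] ≠ pvX xs := by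
          by_contra hno
          push Not at hno
          have hrep : xs = List.replicate xs.length (pvX xs) :=
            List.eq_replicate_of_mem (by
              intro x hx
              obtain ⟨i, hi, rfl⟩ := List.mem_iff_getElem.1 hx
              exact hno i hi)
          refine hs ?_
          conv_lhs => rw [hrep]
          rw [pvX_replicate _ _ (pvX_nonneg xs hall)]
          simp [hevm]
        obtain ⟨i, hi, hne⟩ := hex
        have hwin : xor_test (xs.set i (-1)) (index + 1) = false := by
          rw [hchild i hi, pvX_eraseIdx xs i hall hi]
          have hnz : PySem.Int.bxor (pvX xs) xs[i] ≠ 0 := by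
            intro h0
            exact hne ((pv_bxor_eq_zero (pvX_nonneg xs hall)
              (hall _ (List.getElem_mem hi)) h0)).symm
          simp [hnz, hodd1]
        have hL : ((List.range xs.length).attach.any (fun i =>
            ! xor_test (xs.set i.1 (-1)) (index + 1))) = true := by
          rw [List.any_eq_true]
          exact ⟨⟨i, List.mem_range.2 hi⟩, List.mem_attach _ _, by simp [hwin]⟩
        rw [hL, pvClosed]
        simp only [← hxs]
        simp [hevm]
      · -- odd length, xor ≠ 0 : every move leaves an even board, so every child wins
        have hodm : xs.length % 2 = 1 := Nat.odd_iff.1 hod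
        have hev1 : (xs.length - 1) % 2 = 0 := by omega
        have hL : ((List.range xs.length).attach.any (fun i =>
            ! xor_test (xs.set i.1 (-1)) (index + 1))) = false := by
          rw [List.any_eq_false]
          rintro ⟨i, hmem⟩ -
          have hi : i < xs.length := List.mem_range.1 hmem
          rw [hchild i hi]
          simp [hev1]
        rw [hL, pvClosed]
        simp only [← hxs]
        simp [hs, hodm]

-- ===== VERDICT (by name: the statement is the Claim_ definition above) =====
theorem xor_test_spec : Claim_equal_xor_test := by
  intro nums index _
  show xor_test nums index = xor_test_alt nums index
  rw [pv_alt_eq_closed]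
  exact pv_main _ nums index le_rfl
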